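-- pv_equiv track=rewrite | github.com/firaolgelana/Leetcode-Solutions | 2075-decode-the-slanted-ciphertext/2075-decode-the-slanted-ciphertext.py | decodeCiphertext
-- ===== SOURCE A (Python) =====
-- def decodeCiphertext(encodedText: str, rows: int) -> str:
--     length = len(encodedText)
--     if length == 0:
--         return ""
--
--     cols = length // rows
--     ans = []
--
--     for j in range(cols):
--         r, c = 0, j
--         while r < rows and c < cols:
--             ans.append(encodedText[r * cols + c])
--             r += 1
--             c += 1
--
--     return "".join(ans).rstrip()
-- ===== SOURCE B (Python) =====
-- def decodeCiphertext(encodedText: str, rows: int) -> str: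
--     length = len(encodedText)
--     if length == 0:
--         return ""
--
--     cols = length // rows
--     buckets = {}
--
--     for i in range(rows * cols):
--         r, c = divmod(i, cols)
--         d = c - r
--         if d >= 0:
--             buckets[d] = buckets.get(d, "") + encodedText[i]
--
--     return "".join(buckets.get(d, "") for d in range(cols)).rstrip()
-- ===== Notes on version B (the rewrite author's own statement) =====
-- stated objective: alternative
-- what changed: Instead of walking each diagonal with an outer loop over start columns and an inner two-index while loop, B makes one row-major pass over range(rows*cols), computes (r,c)=divmod(i,cols), and groups characters into a dict keyed by diagonal d=c-r, concatenating the buckets at the end.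
-- outside the precondition, e.g. on decodeCiphertext('abcde', -2): A returns '', B raises IndexError; on decodeCiphertext('ab', 0): A raises ZeroDivisionError, B raises ZeroDivisionError
import Mathlib
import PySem

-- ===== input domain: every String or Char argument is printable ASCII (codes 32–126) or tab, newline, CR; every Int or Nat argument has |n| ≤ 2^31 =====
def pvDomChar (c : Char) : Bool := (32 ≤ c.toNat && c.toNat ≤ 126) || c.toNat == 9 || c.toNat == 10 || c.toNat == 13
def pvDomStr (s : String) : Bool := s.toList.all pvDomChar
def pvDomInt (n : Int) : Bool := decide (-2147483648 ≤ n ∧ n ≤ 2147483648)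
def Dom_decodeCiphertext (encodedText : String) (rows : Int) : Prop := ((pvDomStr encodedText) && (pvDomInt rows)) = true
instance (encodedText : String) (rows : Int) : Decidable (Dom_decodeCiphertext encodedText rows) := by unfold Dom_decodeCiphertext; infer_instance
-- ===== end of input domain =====

-- B replaces A's per-diagonal walks by one row-major pass that groups characters into a dict
-- keyed by diagonal; equal return value on Pre_ (rows ≥ 1 or empty text).


-- ===== PORT A =====
-- the inner 'while r < rows and c < cols' loop of A; the index r*cols+c is always in range
-- when the body runs under Pre_, so pyGetD is exact there
def pvLoopA (s : List Char) (rows cols : Int) (r c : Int) (ans : List Char) : List Char :=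
  if _h : r < rows ∧ c < cols then
    pvLoopA s rows cols (r + 1) (c + 1) (ans ++ [PySem.List.pyGetD s (r * cols + c) ' '])
  else ans
termination_by (rows - r).toNat
decreasing_by omega

def decodeCiphertext (encodedText : String) (rows : Int) : String :=
  let s := encodedText.toList
  let length : Int := s.length
  if length = 0 then "" else
    let cols := PySem.Int.floordiv length rows
    let ans := (PySem.List.pyRange 0 cols 1).foldl (fun ans j => pvLoopA s rows cols 0 j ans) []
    String.ofList (PySem.Chars.rstrip ans)

-- ===== PORT B =====
-- r, c = divmod(i, cols): cols ≠ 0 whenever the range over rows*cols is nonempty, so divmod?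
-- is `some` there and the .getD default is never read under Pre_
def decodeCiphertext_alt (encodedText : String) (rows : Int) : String :=
  let s := encodedText.toList
  let length : Int := s.length
  if length = 0 then "" else
    let cols := PySem.Int.floordiv length rows
    let buckets : PySem.Dict Int (List Char) :=
      (PySem.List.pyRange 0 (rows * cols) 1).foldl (fun bs i =>
        let rc := (PySem.Int.divmod? i cols).getD (0, 0)
        let d := rc.2 - rc.1
        if 0 ≤ d then bs.modify d [] (· ++ [PySem.List.pyGetD s i ' ']) else bs)
        PySem.Dict.empty
    String.ofList (PySem.Chars.rstrip
      (((PySem.List.pyRange 0 cols 1).map (fun d => buckets.getD d [])).flatten))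

-- ===== PRECONDITION & SPEC =====
-- Pre_ excludes, for nonempty text, rows = 0 (A raises ZeroDivisionError) and the negative rows
-- with rows * (len // rows) > len, where A returns '' from an accidentally empty range while B's
-- row-major scan indexes past the end of the string and raises IndexError.
def Pre_decodeCiphertext (encodedText : String) (rows : Int) : Prop :=
  encodedText = "" ∨ 1 ≤ rows ∨
    (rows < 0 ∧ rows * PySem.Int.floordiv (encodedText.length : Int) rows ≤ (encodedText.length : Int))
instance (encodedText : String) (rows : Int) : Decidable (Pre_decodeCiphertext encodedText rows) := by
  unfold Pre_decodeCiphertext; infer_instance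

def pvWitness_decodeCiphertext : String × Int := ("coding", 2)

def Spec_decodeCiphertext (encodedText : String) (rows : Int) (out : String) : Prop := out = decodeCiphertext_alt encodedText rows
instance (encodedText : String) (rows : Int) (out : String) : Decidable (Spec_decodeCiphertext encodedText rows out) := by unfold Spec_decodeCiphertext; infer_instance

-- ===== CLAIM (what is proved, stated in full; the proofs are below) =====
def Claim_equal_decodeCiphertext : Prop := ∀ (encodedText : String) (rows : Int), Dom_decodeCiphertext encodedText rows → Pre_decodeCiphertext encodedText rows → Spec_decodeCiphertext encodedText rows (decodeCiphertext encodedText rows)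

-- ===== LEMMAS AND PROOFS =====

-- the common shape both sides reach: diagonal j of the rows×cols grid, read from s
def pvDiag (s : List Char) (R C j : Nat) : List Char :=
  (List.range (min R (C - j))).map (fun t => s.getD (t * (C + 1) + j) ' ')

-- A's inner while loop, characterised
lemma pvLoopA_eq (s : List Char) (R C : Nat) :
    ∀ (n k j : Nat) (acc : List Char), R - k ≤ n →
      pvLoopA s (R : Int) (C : Int) (k : Int) ((k : Int) + (j : Int)) acc
        = acc ++ (List.range (min R (C - j) - k)).map (fun t => s.getD ((k + t) * (C + 1) + j) ' ') := by
  intro n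
  induction n with
  | zero =>
    intro k j acc h
    rw [pvLoopA]
    have hk : ¬ ((k:Int) < (R:Int) ∧ (k:Int)+(j:Int) < (C:Int)) := by
      rintro ⟨h1, -⟩; have : k < R := by exact_mod_cast h1
      omega
    rw [dif_neg hk]
    have hm : min R (C - j) - k = 0 := by omega
    simp [hm]
  | succ n ih =>
    intro k j acc h
    rw [pvLoopA]
    by_cases hc : (k:Int) < (R:Int) ∧ (k:Int)+(j:Int) < (C:Int)
    · rw [dif_pos hc]
      have hkR : k < R := by exact_mod_cast hc.1
      have hkj : k + j < C := by
        have h2 := hc.2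
        have : ((k + j : Nat) : Int) < (C : Int) := by push_cast; linarith
        exact_mod_cast this
      have e2 : (k:Int) + 1 = ((k+1 : Nat) : Int) := by push_cast; ring
      have e3 : (k:Int) + (j:Int) + 1 = ((k+1 : Nat) : Int) + (j : Int) := by push_cast; ring
      rw [e2, e3, ih (k+1) j _ (by omega)]
      have e4 : (k:Int) * (C:Int) + ((k:Int)+(j:Int)) = ((k*(C+1)+j : Nat) : Int) := by push_cast; ring
      rw [e4, PySem.List.pyGetD_natCast]
      have e5 : min R (C - j) - k = (min R (C - j) - (k+1)) + 1 := by omega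
      rw [e5, List.range_succ_eq_map, List.map_cons, List.map_map]
      have efun : ((fun t => s.getD ((k + t) * (C + 1) + j) ' ') ∘ Nat.succ)
          = (fun t => s.getD ((k + 1 + t) * (C + 1) + j) ' ') := by
        funext t
        simp only [Function.comp, Nat.succ_eq_add_one]
        rw [show k + (t + 1) = k + 1 + t from by omega]
      rw [efun]
      simp [List.append_assoc]
    · rw [dif_neg hc]
      have hcast : ¬(k < R ∧ k + j < C) := by
        rintro ⟨a, b⟩
        exact hc ⟨by exact_mod_cast a, by omega⟩
      have hm : min R (C - j) - k = 0 := by omega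
      simp [hm]

lemma pv_range_mul (R C : Nat) :
    List.range (R * C) = (List.range R).flatMap (fun r => (List.range C).map (fun c => r * C + c)) := by
  induction R with
  | zero => simp
  | succ R ih =>
    rw [Nat.succ_mul, List.range_add, ih, List.range_succ, List.flatMap_append]
    simp [Nat.add_comm]

lemma pv_filter_range_eq (C v : Nat) :
    (List.range C).filter (fun c => c == v) = if v < C then [v] else [] := by
  induction C with
  | zero => simp
  | succ C ih =>
    rw [List.range_succ, List.filter_append, ih]
    by_cases h : v < C
    · simp [h, Nat.lt_succ_of_lt h, show ¬(C = v) from by omega]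
    · by_cases h2 : v = C
      · subst h2
        simp
      · simp [show ¬(v < C) from h, show ¬(v < C + 1) from by omega, show ¬(C = v) from by omega]

lemma pv_flatMap_if {α : Type} (R C d : Nat) (g : Nat → α) :
    (List.range R).flatMap (fun r => if r + d < C then [g r] else [])
      = (List.range (min R (C - d))).map g := by
  induction R with
  | zero => simp
  | succ R ih =>
    rw [List.range_succ, List.flatMap_append, ih]
    simp only [List.flatMap_cons, List.flatMap_nil, List.append_nil]
    by_cases h : R + d < C
    · rw [if_pos h, show min (R+1) (C-d) = (min R (C-d)) + 1 from by omega, List.range_succ]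
      simp [show min R (C - d) = R from by omega]
    · rw [if_neg h, show min (R+1) (C-d) = min R (C-d) from by omega]
      simp

-- the index set of diagonal d inside the row-major range (R*C)
lemma pv_indices_eq (R C d : Nat) :
    ((List.range (R * C)).filter (fun i => i % C == i / C + d))
      = (List.range (min R (C - d))).map (fun t => t * (C + 1) + d) := by
  rw [pv_range_mul, List.filter_flatMap]
  have per : ∀ r : Nat, (((List.range C).map (fun c => r * C + c)).filter (fun i => i % C == i / C + d))
      = if r + d < C then [r * (C + 1) + d] else [] := by
    intro r
    rw [List.filter_map]
    have hcong : ((List.range C).filter ((fun i => i % C == i / C + d) ∘ (fun c => r * C + c)))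
        = (List.range C).filter (fun c => c == r + d) := by
      apply List.filter_congr
      intro c hc
      have hcC : c < C := List.mem_range.mp hc
      simp only [Function.comp]
      have h1 : (r * C + c) % C = c := by
        rw [Nat.mul_comm, Nat.mul_add_mod_self_left, Nat.mod_eq_of_lt hcC]
      have h2 : (r * C + c) / C = r := by
        rw [Nat.mul_comm, Nat.mul_add_div (by omega), Nat.div_eq_of_lt hcC]
        omega
      rw [h1, h2]
    rw [hcong, pv_filter_range_eq]
    by_cases h : r + d < C
    · simp only [if_pos h, List.map_cons, List.map_nil]
      congr 1
      ring
    · simp [h]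
  rw [funext per]
  exact pv_flatMap_if R C d (fun t => t * (C + 1) + d)

-- B's grouping fold, characterised: bucket d holds the characters of diagonal d in scan order
lemma pv_fold_getD (s : List Char) (C : Nat) (hC : 0 < C) :
    ∀ (N : Nat) (bs : PySem.Dict Int (List Char)) (d : Nat),
      ((((List.range N).map (fun (i : Nat) => (i : Int))).foldl (fun bs i =>
          let rc := (PySem.Int.divmod? i (C : Int)).getD (0, 0)
          let dd := rc.2 - rc.1
          if 0 ≤ dd then bs.modify dd [] (· ++ [PySem.List.pyGetD s i ' ']) else bs) bs).getD (d : Int) [])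
        = bs.getD (d : Int) [] ++ ((List.range N).filter (fun i => i % C == i / C + d)).map (fun i => s.getD i ' ') := by
  intro N
  induction N with
  | zero => simp
  | succ N ih =>
    intro bs d
    rw [List.range_succ, List.map_append, List.foldl_append, List.filter_append]
    simp only [List.map_cons, List.map_nil, List.foldl_cons, List.foldl_nil]
    have hdm : PySem.Int.divmod? (N : Int) (C : Int) = some (((N / C : Nat) : Int), ((N % C : Nat) : Int)) := by
      simp only [PySem.Int.divmod?]
      rw [if_neg (show ¬ (C : Int) = 0 from by exact_mod_cast hC.ne')]
      rw [Int.fdiv_eq_ediv, Int.fmod_eq_emod]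
      simp only [if_pos (Or.inl (show (0:Int) ≤ (C:Int) by positivity))]
      simp
    rw [hdm]
    simp only [Option.getD_some]
    by_cases hle : N / C ≤ N % C
    · rw [if_pos (show (0:Int) ≤ ((N % C : Nat) : Int) - ((N / C : Nat) : Int) from by push_cast; omega)]
      have hkey : ((N % C : Nat) : Int) - ((N / C : Nat) : Int) = ((N % C - N / C : Nat) : Int) := by
        push_cast; omega
      rw [hkey, PySem.Dict.getD_modify, ih]
      by_cases heq : N % C = N / C + d
      · rw [if_pos (show (d : Int) = ((N % C - N / C : Nat) : Int) from by omega)]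
        simp [heq, List.append_assoc]
      · rw [if_neg (show ¬ (d : Int) = ((N % C - N / C : Nat) : Int) from by
          intro hc
          have : d = N % C - N / C := by exact_mod_cast hc
          omega)]
        rw [ih]
        have : ¬ (N % C == N / C + d) = true := by simpa using heq
        simp [this]
    · rw [if_neg (show ¬ (0:Int) ≤ ((N % C : Nat) : Int) - ((N / C : Nat) : Int) from by push_cast; omega)]
      rw [ih]
      have : ¬ (N % C == N / C + d) = true := by simp; omega
      simp [this]

lemma pv_bucket_eq (s : List Char) (R C d : Nat) :
    ((((List.range (R * C)).map (fun (i : Nat) => (i : Int))).foldl (fun bs i =>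
        let rc := (PySem.Int.divmod? i (C : Int)).getD (0, 0)
        let dd := rc.2 - rc.1
        if 0 ≤ dd then bs.modify dd [] (· ++ [PySem.List.pyGetD s i ' ']) else bs)
        PySem.Dict.empty).getD (d : Int) [])
      = pvDiag s R C d := by
  by_cases hC : 0 < C
  · rw [pv_fold_getD s C hC (R * C) _ d, pv_indices_eq, List.map_map]
    simp [pvDiag, Function.comp]
  · have h0 : C = 0 := by omega
    subst h0
    simp [pvDiag]

lemma pv_main (s : List Char) (R C : Nat) :
    ((PySem.List.pyRange 0 (C : Int) 1).foldl (fun ans j => pvLoopA s (R : Int) (C : Int) 0 j ans) [])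
      = (((PySem.List.pyRange 0 (C : Int) 1).map (fun dd =>
          ((((List.range (R * C)).map (fun (i : Nat) => (i : Int))).foldl (fun bs i =>
            let rc := (PySem.Int.divmod? i (C : Int)).getD (0, 0)
            let dd := rc.2 - rc.1
            if 0 ≤ dd then bs.modify dd [] (· ++ [PySem.List.pyGetD s i ' ']) else bs)
            PySem.Dict.empty).getD dd []))).flatten) := by
  rw [PySem.List.pyRange_zero_natCast, List.foldl_map, List.map_map]
  have hA : (List.range C).foldl (fun ans (j : Nat) => pvLoopA s (R : Int) (C : Int) 0 ((j : Nat) : Int) ans) []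
      = (List.range C).foldl (fun ans j => ans ++ pvDiag s R C j) [] := by
    apply PySem.List.foldl_congr_mem
    intro acc j _
    have h := pvLoopA_eq s R C R 0 j acc (by omega)
    simpa [pvDiag] using h
  rw [hA, PySem.List.foldl_append_eq_flatMap]
  have hB : ((List.range C).map ((fun dd =>
        ((((List.range (R * C)).map (fun (i : Nat) => (i : Int))).foldl (fun bs i =>
          let rc := (PySem.Int.divmod? i (C : Int)).getD (0, 0)
          let dd := rc.2 - rc.1
          if 0 ≤ dd then bs.modify dd [] (· ++ [PySem.List.pyGetD s i ' ']) else bs)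
          PySem.Dict.empty).getD dd [])) ∘ (fun (j : Nat) => (j : Int))))
      = ((List.range C).map (fun j => pvDiag s R C j)) := by
    apply List.map_congr_left
    intro j _
    simpa [Function.comp] using pv_bucket_eq s R C j
  rw [hB, List.flatMap_def]
  simp

-- ===== VERDICT (by name: the statement is the Claim_ definition above) =====
theorem decodeCiphertext_spec : Claim_equal_decodeCiphertext := by
  intro e rows _hdom hpre
  unfold Spec_decodeCiphertext
  simp only [decodeCiphertext, decodeCiphertext_alt]
  by_cases hL : ((e.toList.length : Int) = 0)
  · rw [if_pos hL, if_pos hL]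
  · rcases hpre with h | hrows | hneg
    · exact absurd (by rw [h]; rfl : (e.toList.length : Int) = 0) hL
    · obtain ⟨R, hR⟩ : ∃ R : Nat, rows = (R : Int) := ⟨rows.toNat, by omega⟩
      rw [if_neg hL, if_neg hL, hR]
      have hfd : PySem.Int.floordiv ((e.toList.length : Int)) (R : Int) = ((e.toList.length / R : Nat) : Int) :=
        PySem.Int.floordiv_natCast _ _
      rw [hfd]
      have hm : (R : Int) * ((e.toList.length / R : Nat) : Int) = ((R * (e.toList.length / R) : Nat) : Int) := by
        push_cast; ring
      rw [hm, PySem.List.pyRange_zero_natCast (R * (e.toList.length / R))]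
      exact congrArg (fun l => String.ofList (PySem.Chars.rstrip l))
        (pv_main e.toList R (e.toList.length / R))
    · -- negative rows: cols < 0, so both outer ranges are empty and both sides return ""
      have hr0 : rows < 0 := hneg.1
      have hcols : PySem.Int.floordiv ((e.toList.length : Int)) rows ≤ 0 := by
        by_cases hok : PySem.Int.floordiv ((e.toList.length : Int)) rows ≤ 0
        · exact hok
        exfalso
        have hge : 0 < PySem.Int.floordiv ((e.toList.length : Int)) rows := by omega
        have h1 := PySem.Int.floordiv_mul_add_mod ((e.toList.length : Int)) rows
        have h2 := PySem.Int.mod_neg_bounds ((e.toList.length : Int)) hr0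
        have h3 : PySem.Int.floordiv ((e.toList.length : Int)) rows * rows ≤ rows := by
          nlinarith
        omega
      rw [if_neg hL, if_neg hL, PySem.List.pyRange_one_eq_nil hcols]
      simp
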